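-- pv_equiv track=rewrite | github.com/cristianosantana/jupter_notebook | project_mcp_v1/mcp_server/context_retrieval/like_pattern.py | question_to_ilike_pattern
-- ===== SOURCE A (Python) =====
-- def question_to_ilike_pattern(question: str) -> str:
--     q = " ".join((question or "").split())
--     if not q:
--         return "%"
--     parts = q.split()
--     escaped: list[str] = []
--     for p in parts:
--         e = p.replace("\\", "\\\\").replace("%", "\\%").replace("_", "\\_")
--         escaped.append(e)
--     core = "%".join(escaped)
--     return f"%{core}%"
-- ===== SOURCE B (Python) =====
-- def question_to_ilike_pattern(question: str) -> str:
--     # Single left-to-right character scan with an in-word state flag: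
--     # emits the ILIKE pattern directly, no split/join/replace passes.
--     out = []
--     in_word = False
--     for ch in (question or ""):
--         if ch.isspace():
--             in_word = False
--         else:
--             if not in_word:
--                 out.append("%")
--                 in_word = True
--             if ch in "\\%_":
--                 out.append("\\")
--             out.append(ch)
--     out.append("%")
--     return "".join(out)
-- ===== Notes on version B (the rewrite author's own statement) =====
-- stated objective: alternative
-- what changed: Replaces A's staged passes (whitespace-split, per-word chained replaces into an accumulator list, % join, f-string wrap) by ONE left-to-right character scan with an in-word state flag that emits the final pattern directly: a % at each word start, a backslash before each metacharacter, and the closing %.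
import Mathlib
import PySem

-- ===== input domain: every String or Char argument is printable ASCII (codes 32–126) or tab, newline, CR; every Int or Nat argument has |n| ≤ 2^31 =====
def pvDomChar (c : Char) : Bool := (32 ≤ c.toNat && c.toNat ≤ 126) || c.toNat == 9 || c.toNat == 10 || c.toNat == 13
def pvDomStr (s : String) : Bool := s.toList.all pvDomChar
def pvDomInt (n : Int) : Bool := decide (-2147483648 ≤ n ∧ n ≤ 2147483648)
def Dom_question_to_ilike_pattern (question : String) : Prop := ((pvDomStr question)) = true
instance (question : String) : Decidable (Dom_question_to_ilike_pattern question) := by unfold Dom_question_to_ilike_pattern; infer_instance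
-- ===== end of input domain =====

-- B replaces A's staged passes (split, per-word chained replaces, % join, wrap) by one
-- left-to-right character scan with an in-word state flag emitting the pattern directly
-- (objective: alternative).

-- ===== PORT A =====
def question_to_ilike_pattern (question : String) : String :=
  let q := PySem.Str.join " " (PySem.Str.split₀ question)   -- 'question or ""' = question on strings: "" is the only falsy string
  if q = "" then "%"
  else
    let parts := PySem.Str.split₀ q
    let escaped : List String := parts.foldl
      (fun acc p => acc ++
        [PySem.Str.replace (PySem.Str.replace (PySem.Str.replace p "\\" "\\\\") "%" "\\%") "_" "\\_"]) []
    let core := PySem.Str.join "%" escaped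
    "%" ++ core ++ "%"

-- ===== PORT B =====
-- single pass over the characters; state = (output so far, in_word flag); out is a char list
-- (Python's list of fragments joined at the end)
def question_to_ilike_pattern_alt (question : String) : String :=
  let st := question.toList.foldl
    (fun st ch =>
      if PySem.Chars.isspace ch then (st.1, false)
      else
        (((if st.2 then st.1 else st.1 ++ ['%']) ++
          (if ch = '\\' ∨ ch = '%' ∨ ch = '_' then ['\\', ch] else [ch])), true))
    (([] : List Char), false)
  String.mk (st.1 ++ ['%'])

-- ===== PRECONDITION & SPEC =====
def Spec_question_to_ilike_pattern (question : String) (out : String) : Prop := out = question_to_ilike_pattern_alt question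
instance (question : String) (out : String) : Decidable (Spec_question_to_ilike_pattern question out) := by unfold Spec_question_to_ilike_pattern; infer_instance

-- ===== CLAIM (what is proved, stated in full; the proofs are below) =====
def Claim_equal_question_to_ilike_pattern : Prop := ∀ (question : String), Dom_question_to_ilike_pattern question → Spec_question_to_ilike_pattern question (question_to_ilike_pattern question)

-- ===== LEMMAS AND PROOFS =====

-- string-literal ↔ char-list bridges used below
theorem litBS : ("\\" : String).toList = ['\\'] := by decide
theorem litBSBS : ("\\\\" : String).toList = ['\\', '\\'] := by decide
theorem litPC : ("%" : String).toList = ['%'] := by decide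
theorem litBSPC : ("\\%" : String).toList = ['\\', '%'] := by decide
theorem litUS : ("_" : String).toList = ['_'] := by decide
theorem litBSUS : ("\\_" : String).toList = ['\\', '_'] := by decide
theorem litSP : (" " : String).toList = [' '] := by decide

-- single-character replace is a flatMap over the characters
theorem replace_go_single (c : Char) (new : List Char) :
    ∀ (s : List Char) (fuel : Nat) (acc : List Char), s.length ≤ fuel →
      PySem.Chars.replace.go [c] new fuel s acc
        = acc.reverse ++ s.flatMap (fun x => if x = c then new else [x]) := by
  intro s
  induction s with
  | nil =>
      intro fuel acc _
      cases fuel <;> simp [PySem.Chars.replace.go]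
  | cons x t ih =>
      intro fuel acc h
      cases fuel with
      | zero => simp at h
      | succ f =>
          by_cases hx : x = c
          · subst hx
            rw [PySem.Chars.replace.go, if_pos (by simp [List.isPrefixOf])]
            have hdrop : List.drop ([x] : List Char).length (x :: t) = t := by simp
            rw [hdrop, ih f (new.reverse ++ acc) (by simp at h; omega)]
            simp
          · rw [PySem.Chars.replace.go,
                if_neg (by
                  simp only [List.isPrefixOf_iff_prefix, List.cons_prefix_cons]
                  intro h'
                  exact hx h'.1.symm)]
            rw [ih f (x :: acc) (by simp at h; omega)]
            simp [hx]

theorem replace_single (s : List Char) (c : Char) (new : List Char) :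
    PySem.Chars.replace s [c] new = s.flatMap (fun x => if x = c then new else [x]) := by
  rw [PySem.Chars.replace, if_neg (by simp)]
  simpa using replace_go_single c new s s.length [] le_rfl

-- the composed character escape
def escC (c : Char) : List Char :=
  if c = '\\' then ['\\', '\\'] else if c = '%' then ['\\', '%'] else if c = '_' then ['\\', '_'] else [c]

theorem escape_eq (s : List Char) :
    PySem.Chars.replace (PySem.Chars.replace (PySem.Chars.replace s ['\\'] ['\\', '\\']) ['%'] ['\\', '%']) ['_'] ['\\', '_']
      = s.flatMap escC := by
  rw [replace_single, replace_single, replace_single, List.flatMap_assoc, List.flatMap_assoc]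
  have hfun : (fun x => List.flatMap
        (fun x => List.flatMap (fun x_1 => if x_1 = '_' then ['\\', '_'] else [x_1])
          (if x = '%' then ['\\', '%'] else [x]))
        (if x = '\\' then ['\\', '\\'] else [x])) = escC := by
    funext c
    by_cases h1 : c = '\\'
    · subst h1; decide
    · by_cases h2 : c = '%'
      · subst h2; decide
      · by_cases h3 : c = '_'
        · subst h3; decide
        · simp [escC, h1, h2, h3]
  rw [hfun]

-- the pattern body as a function of the word list
def escFlat (ws : List (List Char)) : List Char :=
  ws.flatMap (fun w => '%' :: w.flatMap escC)

-- the state machine B implements, as a structural recursion (b = in_word flag)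
def flatSM : Bool → List Char → List Char
  | _, [] => []
  | b, c :: t =>
    if PySem.Chars.isspace c then flatSM false t
    else (if b then escC c else '%' :: escC c) ++ flatSM true t

-- B's fold computes flatSM
theorem foldB (s : List Char) : ∀ (acc : List Char) (b : Bool),
    (s.foldl
      (fun st ch =>
        if PySem.Chars.isspace ch then (st.1, false)
        else
          (((if st.2 then st.1 else st.1 ++ ['%']) ++
            (if ch = '\\' ∨ ch = '%' ∨ ch = '_' then ['\\', ch] else [ch])), true))
      (acc, b)).1 = acc ++ flatSM b s := by
  induction s with
  | nil => intro acc b; simp [flatSM]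
  | cons c t ih =>
      intro acc b
      by_cases hc : PySem.Chars.isspace c
      · simp only [List.foldl_cons, hc, if_pos, ih]
        simp [flatSM, hc]
      · have hemit : (if c = '\\' ∨ c = '%' ∨ c = '_' then ['\\', c] else [c]) = escC c := by
          by_cases h1 : c = '\\'
          · subst h1; decide
          · by_cases h2 : c = '%'
            · subst h2; decide
            · by_cases h3 : c = '_'
              · subst h3; decide
              · simp [escC, h1, h2, h3]
        simp only [List.foldl_cons, hc]
        cases b <;> simp [ih, flatSM, hc, hemit]

-- flatSM false agrees with escFlat ∘ split₀ (state-machine vs split characterization)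
theorem flat_go (s : List Char) : ∀ (cur : List Char) (acc : List (List Char)),
    escFlat (PySem.Chars.split₀.go s cur acc)
      = escFlat acc.reverse ++
        (if cur.isEmpty then flatSM false s else ('%' :: cur.reverse.flatMap escC) ++ flatSM true s) := by
  induction s with
  | nil =>
      intro cur acc
      rw [PySem.Chars.split₀.go]
      by_cases hc : cur.isEmpty
      · simp [hc, flatSM]
      · rw [if_neg hc]
        simp [hc, flatSM, escFlat]
  | cons x t ih =>
      intro cur acc
      rw [PySem.Chars.split₀.go]
      by_cases hx : PySem.Chars.isspace x
      · rw [if_pos hx]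
        by_cases hc : cur.isEmpty
        · rw [if_pos hc, ih [] acc]
          simp [hc, flatSM, hx]
        · rw [if_neg hc, ih [] (cur.reverse :: acc)]
          simp [hc, flatSM, hx, escFlat]
      · rw [if_neg hx, ih (x :: cur) acc]
        by_cases hc : cur.isEmpty
        · have hcur : cur = [] := by simpa [List.isEmpty_iff] using hc
          subst hcur
          simp [flatSM, hx, escFlat]
        · simp [hc, flatSM, hx, escFlat]

theorem flatSM_eq_escFlat (s : List Char) :
    flatSM false s = escFlat (PySem.Chars.split₀ s) := by
  rw [PySem.Chars.split₀]
  rw [flat_go s [] []]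
  simp [escFlat]

-- % separator join of escaped words, with the leading %, is escFlat
theorem join_flat : ∀ (ws : List (List Char)), ws ≠ [] →
    '%' :: PySem.Chars.join ['%'] (ws.map (fun w => w.flatMap escC)) = escFlat ws := by
  intro ws
  induction ws with
  | nil => intro h; exact absurd rfl h
  | cons w r ih =>
      intro _
      cases r with
      | nil => simp [PySem.Chars.join_singleton, escFlat]
      | cons x t =>
          rw [List.map_cons, List.map_cons, PySem.Chars.join_cons_cons]
          have := ih (by simp)
          rw [List.map_cons] at this
          simp only [escFlat, List.flatMap_cons] at this ⊢
          rw [← this]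
          simp

-- words produced by split₀ are nonempty and whitespace-free
theorem split₀_go_valid :
    ∀ (s cur : List Char) (acc : List (List Char)),
      (∀ w ∈ acc, w ≠ [] ∧ ∀ c ∈ w, PySem.Chars.isspace c = false) →
      (∀ c ∈ cur, PySem.Chars.isspace c = false) →
      ∀ w ∈ PySem.Chars.split₀.go s cur acc, w ≠ [] ∧ ∀ c ∈ w, PySem.Chars.isspace c = false := by
  intro s
  induction s with
  | nil =>
      intro cur acc hacc hcur w hw
      rw [PySem.Chars.split₀.go] at hw
      by_cases hc : cur.isEmpty
      · rw [if_pos hc] at hw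
        exact hacc w (by simpa using hw)
      · rw [if_neg hc] at hw
        simp only [List.mem_reverse, List.mem_cons] at hw
        rcases hw with h | h
        · subst h
          have hcur0 : cur ≠ [] := by simpa [List.isEmpty_iff] using hc
          refine ⟨by simpa using hcur0, ?_⟩
          intro c hc'
          exact hcur c (by simpa using hc')
        · exact hacc w h
  | cons x t ih =>
      intro cur acc hacc hcur w hw
      rw [PySem.Chars.split₀.go] at hw
      by_cases hx : PySem.Chars.isspace x = true
      · rw [if_pos hx] at hw
        by_cases hc : cur.isEmpty
        · rw [if_pos hc] at hw
          exact ih [] acc hacc (by simp) w hw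
        · rw [if_neg hc] at hw
          refine ih [] (cur.reverse :: acc) ?_ (by simp) w hw
          intro v hv
          rcases List.mem_cons.mp hv with h | h
          · subst h
            have hcur0 : cur ≠ [] := by simpa [List.isEmpty_iff] using hc
            refine ⟨by simpa using hcur0, ?_⟩
            intro c hc'
            exact hcur c (by simpa using hc')
          · exact hacc v h
      · rw [if_neg hx] at hw
        refine ih (x :: cur) acc hacc ?_ w hw
        intro c hc'
        rcases List.mem_cons.mp hc' with h | h
        · subst h; simpa using hx
        · exact hcur c h

theorem split₀_valid (s : List Char) :
    ∀ w ∈ PySem.Chars.split₀ s, w ≠ [] ∧ ∀ c ∈ w, PySem.Chars.isspace c = false := by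
  intro w hw
  exact split₀_go_valid s [] [] (by simp) (by simp) w (by simpa [PySem.Chars.split₀] using hw)

theorem split₀_go_word :
    ∀ (w : List Char), (∀ c ∈ w, PySem.Chars.isspace c = false) →
      ∀ (rest cur : List Char) (acc : List (List Char)),
        PySem.Chars.split₀.go (w ++ rest) cur acc = PySem.Chars.split₀.go rest (w.reverse ++ cur) acc := by
  intro w
  induction w with
  | nil => intro _ rest cur acc; simp
  | cons x t ih =>
      intro h rest cur acc
      rw [List.cons_append, PySem.Chars.split₀.go,
          if_neg (by simp [h x (List.mem_cons_self)])]
      rw [ih (fun c hc => h c (by simp [hc])) rest (x :: cur) acc]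
      simp

theorem split₀_go_join :
    ∀ (ws : List (List Char)), ws ≠ [] →
      (∀ w ∈ ws, w ≠ [] ∧ ∀ c ∈ w, PySem.Chars.isspace c = false) →
      ∀ (acc : List (List Char)),
        PySem.Chars.split₀.go (PySem.Chars.join [' '] ws) [] acc = acc.reverse ++ ws := by
  intro ws
  induction ws with
  | nil => intro h; exact absurd rfl h
  | cons w r ih =>
      intro _ hval acc
      cases r with
      | nil =>
          have h1 : PySem.Chars.split₀.go w [] acc = PySem.Chars.split₀.go [] w.reverse acc := by
            simpa using split₀_go_word w ((hval w (by simp)).2) [] [] acc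
          rw [PySem.Chars.join_singleton, h1, PySem.Chars.split₀.go,
              if_neg (by
                simp only [List.isEmpty_iff, List.reverse_eq_nil_iff]
                exact (hval w (by simp)).1)]
          simp
      | cons x t =>
          rw [PySem.Chars.join_cons_cons, List.append_assoc,
              split₀_go_word w ((hval w (by simp)).2) ([' '] ++ PySem.Chars.join [' '] (x :: t)) [] acc]
          simp only [List.append_nil, List.singleton_append]
          rw [PySem.Chars.split₀.go, if_pos (by decide),
              if_neg (by
                simp only [List.isEmpty_iff, List.reverse_eq_nil_iff]
                exact (hval w (by simp)).1)]
          simp only [List.reverse_reverse]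
          rw [ih (by simp) (fun v hv => hval v (by simp [hv])) (w :: acc)]
          simp

theorem split₀_join (ws : List (List Char)) (h0 : ws ≠ [])
    (hval : ∀ w ∈ ws, w ≠ [] ∧ ∀ c ∈ w, PySem.Chars.isspace c = false) :
    PySem.Chars.split₀ (PySem.Chars.join [' '] ws) = ws := by
  rw [PySem.Chars.split₀, split₀_go_join ws h0 hval []]
  simp

set_option maxHeartbeats 1000000 in
theorem question_to_ilike_pattern_eq (question : String) :
    question_to_ilike_pattern question = question_to_ilike_pattern_alt question := by
  unfold question_to_ilike_pattern question_to_ilike_pattern_alt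
  dsimp only
  -- B's side: the fold is flatSM false, i.e. escFlat of the word list
  rw [foldB question.toList [] false]
  rw [List.nil_append, flatSM_eq_escFlat]
  set wsc := PySem.Chars.split₀ question.toList with hwsc
  have hval : ∀ w ∈ wsc, w ≠ [] ∧ ∀ c ∈ w, PySem.Chars.isspace c = false :=
    split₀_valid question.toList
  set q := PySem.Str.join " " (PySem.Str.split₀ question) with hq
  have hqc : q.toList = PySem.Chars.join [' '] wsc := by
    rw [hq, PySem.Str.toList_join, PySem.Str.split₀_map_toList, litSP]
  by_cases h0 : wsc = []
  · have hq0 : q = "" := by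
      rw [← String.toList_inj, hqc, h0, PySem.Chars.join_nil]
      rfl
    rw [if_pos hq0, h0]
    rfl
  · have hq0 : q ≠ "" := by
      intro h
      apply h0
      have : q.toList = [] := by rw [h]; rfl
      rw [hqc] at this
      cases hws : wsc with
      | nil => rfl
      | cons w r =>
          rw [hws] at this
          cases r with
          | nil =>
              rw [PySem.Chars.join_singleton] at this
              exact absurd this (hval w (by rw [hws]; simp)).1
          | cons x t =>
              rw [PySem.Chars.join_cons_cons] at this
              have hlen := congrArg List.length this
              simp at hlen
    rw [if_neg hq0, ← String.toList_inj]
    have hfold : ∀ (parts : List String),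
        parts.foldl (fun acc p => acc ++
          [PySem.Str.replace (PySem.Str.replace (PySem.Str.replace p "\\" "\\\\") "%" "\\%") "_" "\\_"]) []
        = parts.map (fun p => PySem.Str.replace (PySem.Str.replace (PySem.Str.replace p "\\" "\\\\") "%" "\\%") "_" "\\_") := by
      intro parts
      induction parts using List.reverseRecOn with
      | nil => simp
      | append_singleton t p ih => simp [ih]
    rw [hfold]
    simp only [String.toList_append, PySem.Str.toList_join, List.map_map,
      litPC]
    have hparts : List.map String.toList (PySem.Str.split₀ q) = wsc := by
      rw [PySem.Str.split₀_map_toList, hqc]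
      exact split₀_join wsc h0 hval
    have hmap : List.map
        (String.toList ∘ fun p => PySem.Str.replace (PySem.Str.replace (PySem.Str.replace p "\\" "\\\\") "%" "\\%") "_" "\\_")
        (PySem.Str.split₀ q)
        = List.map (fun w => w.flatMap escC) wsc := by
      have hcomp : (String.toList ∘ fun p => PySem.Str.replace (PySem.Str.replace (PySem.Str.replace p "\\" "\\\\") "%" "\\%") "_" "\\_")
          = (fun w => w.flatMap escC) ∘ String.toList := by
        funext p
        simp only [Function.comp_apply, PySem.Str.toList_replace, litBS, litBSBS, litPC, litBSPC, litUS, litBSUS]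
        exact escape_eq p.toList
      rw [hcomp, ← List.map_map, hparts]
    rw [hmap]
    have hstr : (String.mk (escFlat wsc ++ ['%'])).toList = escFlat wsc ++ ['%'] := Eq.symm ((fun {l} {s} => String.ofList_eq.mp) rfl)
    rw [hstr, ← join_flat wsc h0]
    rfl

-- ===== VERDICT (by name: the statement is the Claim_ definition above) =====
theorem question_to_ilike_pattern_spec : Claim_equal_question_to_ilike_pattern := by
  intro question _
  unfold Spec_question_to_ilike_pattern
  exact question_to_ilike_pattern_eq question
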